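-- pv_equiv track=rewrite | github.com/Rhriti/contestc0des | cf 918 div 4/e_work2.py | function
-- ===== SOURCE A (Python) =====
-- def function(a):
--     n=len(a)
--     hash={"0":0}
--     count=0
--     for i in range(n):
--         if i%2==0:
--             count+=a[i]
--         else:
--             count-=a[i]
--         if str(count) in hash:
--             return "YES"
--         hash[str(count)]=99999
--     return "NO"
-- ===== SOURCE B (Python) =====
-- def function(a):
--     signed = [x if i % 2 == 0 else -x for i, x in enumerate(a)]
--     prefixes = [0]
--     for x in signed:
--         prefixes.append(prefixes[-1] + x)
--     prefixes.sort()
--     for u, v in zip(prefixes, prefixes[1:]):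
--         if u == v:
--             return "YES"
--     return "NO"
-- ===== Notes on version B (the rewrite author's own statement) =====
-- stated objective: alternative
-- what changed: B sign-flips odd-index elements, builds the cumulative-sum table seeded with 0, then finds a repeated prefix by SORTING the table and scanning adjacent pairs for equality, instead of A's single pass with a string-keyed hash membership test and early return.
import Mathlib
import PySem

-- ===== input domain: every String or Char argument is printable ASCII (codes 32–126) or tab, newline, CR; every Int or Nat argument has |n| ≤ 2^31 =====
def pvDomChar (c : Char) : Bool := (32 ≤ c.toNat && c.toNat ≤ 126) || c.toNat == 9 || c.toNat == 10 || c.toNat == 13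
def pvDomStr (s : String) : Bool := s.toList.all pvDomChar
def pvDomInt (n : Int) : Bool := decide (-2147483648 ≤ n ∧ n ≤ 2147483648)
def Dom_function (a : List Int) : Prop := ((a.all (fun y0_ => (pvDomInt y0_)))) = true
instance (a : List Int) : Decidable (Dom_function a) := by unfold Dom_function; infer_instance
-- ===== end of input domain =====

-- B sign-flips odd-index elements, builds the cumulative-sum table seeded with 0, then SORTS
-- the table and scans adjacent pairs for an equal pair, instead of A's single pass with a
-- string-keyed hash membership test and early return (objective: alternative).

-- ===== PORT A =====
def functionLoop (xs : List Int) (i : Int) (count : Int) (h : PySem.Dict String Int) : String :=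
  match xs with
  | [] => "NO"
  | x :: rest =>
    let count' := if PySem.Int.mod i 2 == 0 then count + x else count - x
    if h.contains (PySem.Int.toStr count') then "YES"
    else functionLoop rest (i + 1) count' (h.insert (PySem.Int.toStr count') 99999)

def function (a : List Int) : String :=
  functionLoop a 0 0 (PySem.Dict.ofList [("0", (0 : Int))])

-- ===== PORT B =====
-- the adjacent-pair scan 'for u, v in zip(prefixes, prefixes[1:])'
def adjEqScan (xs : List Int) : String :=
  match xs with
  | u :: v :: rest => if u == v then "YES" else adjEqScan (v :: rest)
  | _ => "NO"

def function_alt (a : List Int) : String :=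
  let signed := (PySem.List.enumerate a).map
    (fun p => if PySem.Int.mod p.1 2 == 0 then p.2 else -p.2)
  -- prefixes[-1] of the always-nonempty accumulator is its last element
  let prefixes := signed.foldl (fun acc x => acc ++ [acc.getLastD 0 + x]) [(0 : Int)]
  adjEqScan (PySem.List.sorted prefixes (fun x => x) false)

-- ===== PRECONDITION & SPEC =====
def Spec_function (a : List Int) (out : String) : Prop := out = function_alt a
instance (a : List Int) (out : String) : Decidable (Spec_function a out) := by unfold Spec_function; infer_instance

-- ===== CLAIM (what is proved, stated in full; the proofs are below) =====
def Claim_equal_function : Prop := ∀ (a : List Int), Dom_function a → Spec_function a (function a)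

-- ===== LEMMAS AND PROOFS =====

-- Decimal digit list of a natural number, structural form of Nat.toDigits 10.
def decD (n : Nat) : List Char :=
  if _h : n < 10 then [Nat.digitChar n]
  else decD (n / 10) ++ [Nat.digitChar (n % 10)]
decreasing_by exact Nat.div_lt_self (by omega) (by omega)

lemma digitChar_toNat {d : Nat} (h : d < 10) : (Nat.digitChar d).toNat = 48 + d := by
  interval_cases d <;> decide

lemma digitChar_ne_dash {d : Nat} (h : d < 10) : Nat.digitChar d ≠ '-' := by
  interval_cases d <;> decide

lemma dash_not_mem_decD (n : Nat) : '-' ∉ decD n := by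
  induction n using Nat.strong_induction_on with
  | _ n ih =>
    rw [decD]
    split
    · next h =>
      simp only [List.mem_singleton]
      exact fun e => digitChar_ne_dash h e.symm
    · next h =>
      intro hm
      rcases List.mem_append.mp hm with hm | hm
      · exact ih (n / 10) (Nat.div_lt_self (by omega) (by omega)) hm
      · simp at hm
        exact digitChar_ne_dash (Nat.mod_lt n (by omega)) hm.symm

lemma val_decD (n : Nat) : ∀ a : Nat,
    (decD n).foldl (fun a c => 10 * a + (c.toNat - 48)) a = a * 10 ^ (decD n).length + n := by
  induction n using Nat.strong_induction_on with
  | _ n ih =>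
    intro a
    rw [decD]
    split
    · next h =>
      simp [List.foldl, digitChar_toNat h]
      ring
    · next h =>
      rw [List.foldl_append, ih (n / 10) (Nat.div_lt_self (by omega) (by omega)) a]
      simp [List.foldl, digitChar_toNat (Nat.mod_lt n (by omega) : n % 10 < 10)]
      have hd : 10 * (n / 10) + n % 10 = n := by omega
      ring_nf
      omega

lemma decD_inj {m n : Nat} (h : decD m = decD n) : m = n := by
  have hm := val_decD m 0
  have hn := val_decD n 0
  rw [h] at hm
  omega

lemma toDigitsCore_eq : ∀ (f n : Nat), n ≤ f → ∀ (ds : List Char),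
    Nat.toDigitsCore 10 (f + 1) n ds = decD n ++ ds := by
  intro f
  induction f with
  | zero =>
    intro n hn ds
    have : n = 0 := by omega
    subst this
    simp [Nat.toDigitsCore, decD]
  | succ f ih =>
    intro n hn ds
    rw [Nat.toDigitsCore]
    by_cases h10 : n < 10
    · rw [if_pos (Nat.div_eq_of_lt h10)]
      rw [decD]
      simp [h10, Nat.mod_eq_of_lt h10]
    · have hne : ¬ (n / 10 = 0) := by
        have : 10 ≤ n := by omega
        have := Nat.div_le_div_right (c := 10) this
        simp at this
        omega
      rw [if_neg hne]
      rw [ih (n / 10) (by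
        have := Nat.div_lt_self (show 0 < n by omega) (show 1 < 10 by omega)
        omega) _]
      conv_rhs => rw [decD]
      rw [dif_neg h10]
      simp

lemma toDigits_eq (n : Nat) : Nat.toDigits 10 n = decD n := by
  show Nat.toDigitsCore 10 (n + 1) n [] = decD n
  rw [toDigitsCore_eq n n le_rfl []]
  simp

lemma toChars_inj {a b : Int} (h : PySem.Int.toChars a = PySem.Int.toChars b) : a = b := by
  unfold PySem.Int.toChars at h
  split_ifs at h with ha hb hb
  · rw [toDigits_eq, toDigits_eq] at h
    have := decD_inj (List.cons.injEq _ _ _ _ ▸ h |> (by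
      intro h'; exact (List.cons.inj h').2 : '-' :: decD a.natAbs = '-' :: decD b.natAbs → decD a.natAbs = decD b.natAbs))
    omega
  · rw [toDigits_eq, toDigits_eq] at h
    exfalso
    apply dash_not_mem_decD b.toNat
    rw [← h]
    exact List.mem_cons_self
  · rw [toDigits_eq, toDigits_eq] at h
    exfalso
    apply dash_not_mem_decD a.toNat
    rw [h]
    exact List.mem_cons_self
  · rw [toDigits_eq, toDigits_eq] at h
    have := decD_inj h
    omega

lemma toStr_inj {a b : Int} (h : PySem.Int.toStr a = PySem.Int.toStr b) : a = b := by
  have : (PySem.Int.toStr a).toList = (PySem.Int.toStr b).toList := by rw [h]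
  rw [PySem.Int.toList_toStr, PySem.Int.toList_toStr] at this
  exact toChars_inj this

-- the alternating prefix sums produced from index i and running value c
def altPrefs (xs : List Int) (i c : Int) : List Int :=
  match xs with
  | [] => []
  | x :: rest =>
    let c' := if PySem.Int.mod i 2 == 0 then c + x else c - x
    c' :: altPrefs rest (i + 1) c'

lemma loop_mem : ∀ (xs : List Int) (i c : Int) (h : PySem.Dict String Int),
    functionLoop xs i c h = "YES" ∨ functionLoop xs i c h = "NO" := by
  intro xs
  induction xs with
  | nil => intro i c h; right; rfl
  | cons x rest ih =>
    intro i c h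
    rw [functionLoop]
    split <;> split
    all_goals first | (left; rfl) | exact ih _ _ _

lemma loop_NO_iff : ∀ (xs : List Int) (i c : Int) (seen : List Int) (h : PySem.Dict String Int),
    h.keys = seen.map PySem.Int.toStr → seen.Nodup →
    (functionLoop xs i c h = "NO" ↔ (seen ++ altPrefs xs i c).Nodup) := by
  intro xs
  induction xs with
  | nil =>
    intro i c seen h hk hnd
    simp [functionLoop, altPrefs, hnd]
  | cons x rest ih =>
    intro i c seen h hk hnd
    rw [functionLoop, altPrefs]
    have hcont : h.contains (PySem.Int.toStr (if PySem.Int.mod i 2 == 0 then c + x else c - x))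
        = decide ((if PySem.Int.mod i 2 == 0 then c + x else c - x) ∈ seen) := by
      rw [PySem.Dict.contains_eq_decide_mem_keys, hk]
      congr 1
      simp only [List.mem_map, eq_iff_iff]
      constructor
      · rintro ⟨y, hy, he⟩
        rwa [toStr_inj he] at hy
      · intro hy
        exact ⟨_, hy, rfl⟩
    set c' := if PySem.Int.mod i 2 == 0 then c + x else c - x with hc'
    rw [hcont]
    by_cases hmem : c' ∈ seen
    · simp only [hmem, decide_true, if_true]
      constructor
      · intro h'; exact absurd h' (by decide)
      · intro hnd'
        exfalso
        have h2 := List.nodup_append.mp hnd'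
        exact h2.2.2 c' hmem c' List.mem_cons_self rfl
    · simp only [hmem, decide_false]
      rw [show (if false = true then "YES"
            else functionLoop rest (i + 1) c' (h.insert (PySem.Int.toStr c') 99999))
          = functionLoop rest (i + 1) c' (h.insert (PySem.Int.toStr c') 99999) from rfl]
      rw [ih (i + 1) c' (seen ++ [c'])
        (h.insert (PySem.Int.toStr c') 99999)
        (by
          rw [PySem.Dict.keys_insert_of_not_contains _ _ (by simp [hcont, hmem])]
          rw [hk, List.map_append]
          rfl)
        (by
          rw [List.nodup_append]
          exact ⟨hnd, List.nodup_singleton _, by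
            intro y hy b hb
            rw [List.mem_singleton] at hb
            subst hb
            exact fun e => hmem (e ▸ hy)⟩)]
      rw [List.append_assoc, List.singleton_append]

-- B's fold over the signed list produces the same alternating prefix table
lemma foldl_signed : ∀ (xs : List Int) (i : Int) (acc : List Int) (c : Int),
    acc.getLastD 0 = c →
    ((PySem.List.enumerate xs i).map
        (fun p => if PySem.Int.mod p.1 2 == 0 then p.2 else -p.2)).foldl
      (fun acc x => acc ++ [acc.getLastD 0 + x]) acc
    = acc ++ altPrefs xs i c := by
  intro xs
  induction xs with
  | nil => intro i acc c _; simp [PySem.List.enumerate_nil, altPrefs]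
  | cons x rest ih =>
    intro i acc c hlast
    rw [PySem.List.enumerate_cons, List.map_cons, List.foldl_cons, altPrefs]
    simp only []
    set c' := if PySem.Int.mod i 2 == 0 then c + x else c - x with hc'
    have hstep : acc.getLastD 0 + (if PySem.Int.mod i 2 == 0 then x else -x) = c' := by
      rw [hlast, hc']
      split <;> ring
    rw [hstep]
    rw [ih (i + 1) (acc ++ [c']) c' (by simp)]
    rw [List.append_assoc, List.singleton_append]

-- on a ≤-sorted list, the adjacent-pair scan returns "NO" exactly on duplicate-free lists
lemma adjEqScan_NO_iff : ∀ (l : List Int), l.Pairwise (· ≤ ·) →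
    (adjEqScan l = "NO" ↔ l.Nodup) := by
  intro l
  induction l with
  | nil => intro _; simp [adjEqScan]
  | cons u t ih =>
    intro hp
    match t, ih with
    | [], _ => simp [adjEqScan]
    | v :: rest, ih =>
      rw [adjEqScan]
      by_cases huv : u = v
      · simp only [huv, beq_self_eq_true, if_true]
        constructor
        · intro h'; exact absurd h' (by decide)
        · intro hnd
          subst huv
          exact absurd List.mem_cons_self (List.nodup_cons.mp hnd).1
      · have hb : (u == v) = false := by simp [huv]
        rw [hb]
        simp only [Bool.false_eq_true, if_false]
        have hpt : (v :: rest).Pairwise (· ≤ ·) := hp.tail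
        rw [ih hpt]
        constructor
        · intro hnd
          rw [List.nodup_cons]
          refine ⟨?_, hnd⟩
          intro hmem
          have huv' : u < v := lt_of_le_of_ne (List.rel_of_pairwise_cons hp List.mem_cons_self) huv
          rcases List.mem_cons.mp hmem with h | h
          · exact huv h
          · have : v ≤ u := List.rel_of_pairwise_cons hpt h
            omega
        · intro hnd
          exact (List.nodup_cons.mp hnd).2

lemma adjEqScan_mem (l : List Int) : adjEqScan l = "YES" ∨ adjEqScan l = "NO" := by
  induction l with
  | nil => right; rfl
  | cons u t ih =>
    match t, ih with
    | [], _ => right; rfl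
    | v :: rest, ih =>
      rw [adjEqScan]
      split
      · left; rfl
      · exact ih

lemma function_alt_eq (a : List Int) :
    function_alt a = if (0 :: altPrefs a 0 0).Nodup then "NO" else "YES" := by
  show adjEqScan (PySem.List.sorted
      (((PySem.List.enumerate a).map
          (fun p => if PySem.Int.mod p.1 2 == 0 then p.2 else -p.2)).foldl
        (fun acc x => acc ++ [acc.getLastD 0 + x]) [(0 : Int)]) (fun x => x) false) = _
  rw [foldl_signed a 0 [(0 : Int)] 0 rfl]
  rw [List.singleton_append]
  set P := (0 : Int) :: altPrefs a 0 0 with hP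
  have hperm : (PySem.List.sorted P (fun x => x) false).Perm P := PySem.List.sorted_perm _ _ _
  have hpw : (PySem.List.sorted P (fun x => x) false).Pairwise (· ≤ ·) :=
    PySem.List.sorted_pairwise P (fun x => x)
  have hiff : adjEqScan (PySem.List.sorted P (fun x => x) false) = "NO" ↔ P.Nodup := by
    rw [adjEqScan_NO_iff _ hpw, hperm.nodup_iff]
  by_cases hnd : P.Nodup
  · rw [if_pos hnd]
    exact hiff.mpr hnd
  · rw [if_neg hnd]
    rcases adjEqScan_mem (PySem.List.sorted P (fun x => x) false) with h | h
    · exact h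
    · exact absurd (hiff.mp h) hnd

lemma function_eq_NO_iff (a : List Int) :
    function a = "NO" ↔ (0 :: altPrefs a 0 0).Nodup := by
  unfold function
  rw [loop_NO_iff a 0 0 [0] _ (by decide) (List.nodup_singleton _)]
  rw [List.singleton_append]

-- ===== VERDICT (by name: the statement is the Claim_ definition above) =====
theorem function_spec : Claim_equal_function := by
  intro a _
  unfold Spec_function
  rw [function_alt_eq]
  by_cases hnd : (0 :: altPrefs a 0 0).Nodup
  · rw [if_pos hnd]
    exact (function_eq_NO_iff a).mpr hnd
  · rw [if_neg hnd]
    rcases loop_mem a 0 0 (PySem.Dict.ofList [("0", (0 : Int))]) with h | h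
    · exact h
    · exact absurd ((function_eq_NO_iff a).mp h) hnd
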